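-- pv_equiv track=rewrite | github.com/xhy52xhy/MRCL-SEA | test.py | get_neighbor_distribution
-- ===== SOURCE A (Python) =====
-- from collections import defaultdict
--
-- def get_neighbor_distribution(triples):
--     # 计算一跳邻居
--     one_hop_neighbors = defaultdict(set)
--     for h, r, t in triples:
--         one_hop_neighbors[h].add(t)
--         one_hop_neighbors[t].add(h)
--
--     # 计算二跳邻居
--     two_hop_neighbors = defaultdict(set)
--     for node in one_hop_neighbors:
--         for neighbor in one_hop_neighbors[node]:
--             two_hop_neighbors[node].update(one_hop_neighbors[neighbor])
--             two_hop_neighbors[node].discard(node)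
--
--     # 统计分布
--     distribution = defaultdict(list)
--     for node in one_hop_neighbors:
--         one_hop_count = len(one_hop_neighbors[node])
--         two_hop_count = len(two_hop_neighbors[node])
--         distribution[one_hop_count].append(two_hop_count)
--
--     return distribution
-- ===== SOURCE B (Python) =====
-- from collections import defaultdict
--
-- def get_neighbor_distribution(triples):
--     # one-hop adjacency (same build as A)
--     adj = defaultdict(set)
--     for h, r, t in triples:
--         adj[h].add(t)
--         adj[t].add(h)
--
--     # No two-hop sets at all: since the adjacency is symmetric, w is a two-hop
--     # neighbor of node exactly when w != node and they share a common neighbor,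
--     # so count over all nodes with a pairwise common-neighbor test.
--     nodes = list(adj)
--     distribution = defaultdict(list)
--     for node in nodes:
--         two_hop_count = sum(
--             1 for w in nodes
--             if w != node and any(m in adj[w] for m in adj[node]))
--         distribution[len(adj[node])].append(two_hop_count)
--
--     return distribution
-- ===== Notes on version B (the rewrite author's own statement) =====
-- stated objective: alternative
-- what changed: B computes no two-hop sets at all: using symmetry of the adjacency it counts, for each node, the other nodes that share a common neighbor with it via a pairwise common-neighbor test over all node pairs, instead of A's union of neighbor sets into a two_hop table.
import Mathlib
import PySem

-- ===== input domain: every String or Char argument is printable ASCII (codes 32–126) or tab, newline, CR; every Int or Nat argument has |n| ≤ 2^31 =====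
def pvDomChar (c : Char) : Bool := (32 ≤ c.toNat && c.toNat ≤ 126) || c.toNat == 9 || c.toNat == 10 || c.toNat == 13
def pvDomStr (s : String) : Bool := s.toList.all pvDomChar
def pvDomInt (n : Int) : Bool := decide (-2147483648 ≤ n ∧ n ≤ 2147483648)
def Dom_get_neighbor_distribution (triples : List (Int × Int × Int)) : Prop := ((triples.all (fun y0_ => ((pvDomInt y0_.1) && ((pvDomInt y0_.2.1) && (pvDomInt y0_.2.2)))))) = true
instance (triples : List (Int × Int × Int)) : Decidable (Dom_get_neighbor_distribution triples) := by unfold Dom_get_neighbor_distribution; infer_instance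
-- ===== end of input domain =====

-- B builds no two-hop sets at all: since the adjacency is symmetric, it counts for each
-- node the other nodes sharing a common neighbor with it, by a pairwise test (objective: alternative).

-- ===== PORT A =====
-- one_hop_neighbors = defaultdict(set); for h, r, t: add t to [h] and h to [t]
def pvBuildOneHop (triples : List (Int × Int × Int)) : PySem.Dict Int (PySem.Set Int) :=
  triples.foldl (fun d hrt =>
    let d := d.modify hrt.1 PySem.Set.empty (fun s => s.add hrt.2.2)
    d.modify hrt.2.2 PySem.Set.empty (fun s => s.add hrt.1)) PySem.Dict.empty

def get_neighbor_distribution (triples : List (Int × Int × Int)) : List (Int × List Int) :=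
  let one_hop := pvBuildOneHop triples
  -- for node in one_hop: for neighbor in one_hop[node]: two_hop[node].update(one_hop[neighbor]); two_hop[node].discard(node)
  let two_hop : PySem.Dict Int (PySem.Set Int) :=
    one_hop.keys.foldl (fun d2 node =>
      (one_hop.getD node PySem.Set.empty).foldl (fun d2 neighbor =>
        let d2 := d2.modify node PySem.Set.empty
          (fun s => s.update (one_hop.getD neighbor PySem.Set.empty))
        d2.modify node PySem.Set.empty (fun s => s.discard node)) d2) PySem.Dict.empty
  -- for node in one_hop: distribution[len(one_hop[node])].append(len(two_hop[node]))
  let distribution : PySem.Dict Int (List Int) :=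
    one_hop.keys.foldl (fun d node =>
      let one_hop_count : Int := (PySem.Set.len (one_hop.getD node PySem.Set.empty) : Int)
      let two_hop_count : Int := (PySem.Set.len (two_hop.getD node PySem.Set.empty) : Int)
      d.modify one_hop_count [] (fun l => l ++ [two_hop_count])) PySem.Dict.empty
  distribution.items

-- ===== PORT B =====
-- same first loop as A (the adjacency build is kept identical)
def pvBuildAdj (triples : List (Int × Int × Int)) : PySem.Dict Int (PySem.Set Int) :=
  triples.foldl (fun d hrt =>
    let d := d.modify hrt.1 PySem.Set.empty (fun s => s.add hrt.2.2)
    d.modify hrt.2.2 PySem.Set.empty (fun s => s.add hrt.1)) PySem.Dict.empty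

def get_neighbor_distribution_alt (triples : List (Int × Int × Int)) : List (Int × List Int) :=
  let adj := pvBuildAdj triples
  let nodes := adj.keys
  -- two_hop_count = sum(1 for w in nodes if w != node and any(m in adj[w] for m in adj[node]))
  let distribution : PySem.Dict Int (List Int) :=
    nodes.foldl (fun d node =>
      let two_hop_count : Int :=
        nodes.foldl (fun c w =>
          if w ≠ node ∧ (adj.getD node PySem.Set.empty).any
              (fun m => PySem.Set.contains (adj.getD w PySem.Set.empty) m)
          then c + 1 else c) 0
      d.modify (PySem.Set.len (adj.getD node PySem.Set.empty) : Int) []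
        (fun l => l ++ [two_hop_count])) PySem.Dict.empty
  distribution.items

-- ===== PRECONDITION & SPEC =====
def Spec_get_neighbor_distribution (triples : List (Int × Int × Int)) (out : List (Int × List Int)) : Prop := out = get_neighbor_distribution_alt triples
instance (triples : List (Int × Int × Int)) (out : List (Int × List Int)) : Decidable (Spec_get_neighbor_distribution triples out) := by unfold Spec_get_neighbor_distribution; infer_instance

-- ===== CLAIM (what is proved, stated in full; the proofs are below) =====
def Claim_equal_get_neighbor_distribution : Prop := ∀ (triples : List (Int × Int × Int)), Dom_get_neighbor_distribution triples → Spec_get_neighbor_distribution triples (get_neighbor_distribution triples)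

-- ===== LEMMAS AND PROOFS =====

-- discarding n commutes with add, as element lists
theorem pv_discard_add (s t : PySem.Set Int) (n x : Int)
    (h : PySem.Set.discard s n = PySem.Set.discard t n) :
    PySem.Set.discard (PySem.Set.add s x) n = PySem.Set.discard (PySem.Set.add t x) n := by
  by_cases hx : x = n
  · have e : ∀ (u : PySem.Set Int), PySem.Set.discard (PySem.Set.add u x) n = PySem.Set.discard u n := by
      intro u
      by_cases hm : x ∈ u
      · rw [PySem.Set.add_of_mem hm]
      · rw [PySem.Set.add_of_not_mem hm]
        simp [PySem.Set.discard, List.filter_append, hx]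
    rw [e, e, h]
  · have hmem : x ∈ s ↔ x ∈ t := by
      constructor <;> intro hm
      · have : x ∈ PySem.Set.discard s n := (PySem.Set.mem_discard s n x).2 ⟨hm, hx⟩
        rw [h] at this
        exact ((PySem.Set.mem_discard t n x).1 this).1
      · have : x ∈ PySem.Set.discard t n := (PySem.Set.mem_discard t n x).2 ⟨hm, hx⟩
        rw [← h] at this
        exact ((PySem.Set.mem_discard s n x).1 this).1
    by_cases hs : x ∈ s
    · rw [PySem.Set.add_of_mem hs, PySem.Set.add_of_mem (hmem.1 hs), h]
    · rw [PySem.Set.add_of_not_mem hs, PySem.Set.add_of_not_mem (fun ht => hs (hmem.2 ht))]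
      simp only [PySem.Set.discard] at h ⊢
      simp [List.filter_append, h, hx]

theorem pv_discard_update (xs : List Int) (s t : PySem.Set Int) (n : Int)
    (h : PySem.Set.discard s n = PySem.Set.discard t n) :
    PySem.Set.discard (PySem.Set.update s xs) n = PySem.Set.discard (PySem.Set.update t xs) n := by
  induction xs generalizing s t with
  | nil => simpa [PySem.Set.update] using h
  | cons x xs ih =>
    rw [PySem.Set.update_cons, PySem.Set.update_cons]
    exact ih _ _ (pv_discard_add s t n x h)

-- A's interleaved update/discard fold equals a pure union fold followed by one discard
theorem pv_inner_eq (f : Int → PySem.Set Int) (xs : List Int) (n : Int) (s : PySem.Set Int) :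
    xs.foldl (fun s nb => PySem.Set.discard (PySem.Set.update s (f nb)) n)
        (PySem.Set.discard s n)
      = PySem.Set.discard (xs.foldl (fun s nb => PySem.Set.update s (f nb)) s) n := by
  induction xs generalizing s with
  | nil => rfl
  | cons x xs ih =>
    simp only [List.foldl_cons]
    rw [← ih (PySem.Set.update s (f x))]
    congr 1
    exact pv_discard_update (f x) (PySem.Set.discard s n) s n
      (by simp [PySem.Set.discard, List.filter_filter])

-- two modifies at the same key compose
theorem pv_modify_modify (d : PySem.Dict Int (PySem.Set Int)) (k : Int)
    (e : PySem.Set Int) (f g : PySem.Set Int → PySem.Set Int) :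
    (d.modify k e f).modify k e g = d.modify k e (fun s => g (f s)) := by
  simp [PySem.Dict.modify, PySem.Dict.getD, PySem.Dict.get?_insert_self,
    PySem.Dict.insert_insert_self]

-- a fold whose steps all modify the same key k, read back at k
theorem pv_getD_foldl_modify_same (l : List Int) (d : PySem.Dict Int (PySem.Set Int)) (k : Int)
    (e : PySem.Set Int) (F : Int → PySem.Set Int → PySem.Set Int) :
    (l.foldl (fun d b => d.modify k e (F b)) d).getD k e
      = l.foldl (fun v b => F b v) (d.getD k e) := by
  induction l generalizing d with
  | nil => rfl
  | cons x xs ih => simp only [List.foldl_cons]; rw [ih, PySem.Dict.getD_modify_self]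

-- abbreviation for A's inner per-node step on dictionaries
def pvStepA (one_hop : PySem.Dict Int (PySem.Set Int)) (d2 : PySem.Dict Int (PySem.Set Int))
    (node : Int) : PySem.Dict Int (PySem.Set Int) :=
  (one_hop.getD node PySem.Set.empty).foldl (fun d2 neighbor =>
    let d2 := d2.modify node PySem.Set.empty
      (fun s => s.update (one_hop.getD neighbor PySem.Set.empty))
    d2.modify node PySem.Set.empty (fun s => s.discard node)) d2

theorem pv_stepA_getD_ne (oh d2 : PySem.Dict Int (PySem.Set Int)) (n k : Int) (h : k ≠ n) :
    (pvStepA oh d2 n).getD k PySem.Set.empty = d2.getD k PySem.Set.empty := by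
  unfold pvStepA
  induction (oh.getD n PySem.Set.empty) generalizing d2 with
  | nil => rfl
  | cons x xs ih =>
    simp only [List.foldl_cons]
    rw [ih, PySem.Dict.getD_modify_of_ne _ _ _ h, PySem.Dict.getD_modify_of_ne _ _ _ h]

theorem pv_stepA_getD_self (oh d2 : PySem.Dict Int (PySem.Set Int)) (n : Int) :
    (pvStepA oh d2 n).getD n PySem.Set.empty
      = (oh.getD n PySem.Set.empty).foldl
          (fun s nb => PySem.Set.discard (PySem.Set.update s (oh.getD nb PySem.Set.empty)) n)
          (d2.getD n PySem.Set.empty) := by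
  unfold pvStepA
  have := pv_getD_foldl_modify_same (oh.getD n PySem.Set.empty) d2 n PySem.Set.empty
    (fun nb s => PySem.Set.discard (PySem.Set.update s (oh.getD nb PySem.Set.empty)) n)
  simp only [pv_modify_modify]
  exact this

-- folding pvStepA over the rest of the keys leaves an untouched key alone
theorem pv_foldl_stepA_not_mem (oh : PySem.Dict Int (PySem.Set Int)) (l : List Int)
    (d2 : PySem.Dict Int (PySem.Set Int)) (k : Int) (h : k ∉ l) :
    (l.foldl (pvStepA oh) d2).getD k PySem.Set.empty = d2.getD k PySem.Set.empty := by
  induction l generalizing d2 with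
  | nil => rfl
  | cons x xs ih =>
    simp only [List.foldl_cons]
    rw [ih _ (fun hx => h (List.mem_cons_of_mem _ hx)),
      pv_stepA_getD_ne _ _ _ _ (fun hk => h (by rw [hk]; exact List.mem_cons_self))]

-- A's two_hop lookup at a node of a duplicate-free key list
theorem pv_twoHop_getD (oh : PySem.Dict Int (PySem.Set Int)) (l : List Int)
    (d2 : PySem.Dict Int (PySem.Set Int)) (node : Int)
    (hnd : l.Nodup) (hmem : node ∈ l) :
    (l.foldl (pvStepA oh) d2).getD node PySem.Set.empty
      = (oh.getD node PySem.Set.empty).foldl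
          (fun s nb => PySem.Set.discard (PySem.Set.update s (oh.getD nb PySem.Set.empty)) node)
          (d2.getD node PySem.Set.empty) := by
  induction l generalizing d2 with
  | nil => cases hmem
  | cons x xs ih =>
    simp only [List.foldl_cons]
    rcases List.mem_cons.1 hmem with h | h
    · subst h
      rw [pv_foldl_stepA_not_mem oh xs _ node (List.nodup_cons.1 hnd).1]
      exact pv_stepA_getD_self oh d2 node
    · rw [ih _ (List.nodup_cons.1 hnd).2 h,
        pv_stepA_getD_ne oh d2 x node (fun hk => (List.nodup_cons.1 hnd).1 (by rw [← hk]; exact h))]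

-- the adjacency dict has duplicate-free keys
theorem pv_oneHop_keys_nodup (triples : List (Int × Int × Int)) :
    (pvBuildOneHop triples).keys.Nodup := by
  unfold pvBuildOneHop
  have : ∀ (l : List (Int × Int × Int)) (d : PySem.Dict Int (PySem.Set Int)),
      d.keys.Nodup →
      (l.foldl (fun d hrt =>
        let d := d.modify hrt.1 PySem.Set.empty (fun s => s.add hrt.2.2)
        d.modify hrt.2.2 PySem.Set.empty (fun s => s.add hrt.1)) d).keys.Nodup := by
    intro l
    induction l with
    | nil => intro d h; exact h
    | cons x xs ih =>
      intro d h
      exact ih _ (PySem.Dict.nodup_keys_insert _ _ _ (PySem.Dict.nodup_keys_insert _ _ _ h))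
  exact this triples PySem.Dict.empty (by simp [PySem.Dict.empty, PySem.Dict.keys])

-- membership in a getD after one adjacency step
theorem pv_adj_step_mem (d : PySem.Dict Int (PySem.Set Int)) (h t a b : Int) :
    a ∈ (((d.modify h PySem.Set.empty (fun s => s.add t)).modify t PySem.Set.empty
        (fun s => s.add h)).getD b PySem.Set.empty)
      ↔ a ∈ d.getD b PySem.Set.empty ∨ (a = t ∧ b = h) ∨ (a = h ∧ b = t) := by
  by_cases hbt : b = t <;> by_cases hbh : b = h <;> by_cases hth : t = h <;>
    simp_all [PySem.Dict.getD_modify, PySem.Set.mem_add]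

-- the adjacency relation is symmetric
theorem pv_adj_symm (triples : List (Int × Int × Int)) (a b : Int) :
    a ∈ (pvBuildOneHop triples).getD b PySem.Set.empty
      ↔ b ∈ (pvBuildOneHop triples).getD a PySem.Set.empty := by
  unfold pvBuildOneHop
  have : ∀ (l : List (Int × Int × Int)) (d : PySem.Dict Int (PySem.Set Int)),
      (∀ a b : Int, a ∈ d.getD b PySem.Set.empty ↔ b ∈ d.getD a PySem.Set.empty) →
      ∀ a b : Int,
        a ∈ (l.foldl (fun d hrt =>
          let d := d.modify hrt.1 PySem.Set.empty (fun s => s.add hrt.2.2)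
          d.modify hrt.2.2 PySem.Set.empty (fun s => s.add hrt.1)) d).getD b PySem.Set.empty
        ↔ b ∈ (l.foldl (fun d hrt =>
          let d := d.modify hrt.1 PySem.Set.empty (fun s => s.add hrt.2.2)
          d.modify hrt.2.2 PySem.Set.empty (fun s => s.add hrt.1)) d).getD a PySem.Set.empty := by
    intro l
    induction l with
    | nil => intro d hd; exact hd
    | cons x xs ih =>
      intro d hd a b
      refine ih _ (fun a b => ?_) a b
      rw [pv_adj_step_mem, pv_adj_step_mem, hd a b]
      tauto
  exact this triples PySem.Dict.empty
    (fun a b => by simp [PySem.Dict.getD_empty, PySem.Set.empty]) a b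

-- every member of an adjacency set is a key
theorem pv_adj_mem_keys (triples : List (Int × Int × Int)) (a b : Int)
    (h : a ∈ (pvBuildOneHop triples).getD b PySem.Set.empty) :
    a ∈ (pvBuildOneHop triples).keys := by
  unfold pvBuildOneHop at h ⊢
  have : ∀ (l : List (Int × Int × Int)) (d : PySem.Dict Int (PySem.Set Int)),
      (∀ a b : Int, a ∈ d.getD b PySem.Set.empty → a ∈ d.keys) →
      ∀ a b : Int,
        a ∈ (l.foldl (fun d hrt =>
          let d := d.modify hrt.1 PySem.Set.empty (fun s => s.add hrt.2.2)
          d.modify hrt.2.2 PySem.Set.empty (fun s => s.add hrt.1)) d).getD b PySem.Set.empty →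
        a ∈ (l.foldl (fun d hrt =>
          let d := d.modify hrt.1 PySem.Set.empty (fun s => s.add hrt.2.2)
          d.modify hrt.2.2 PySem.Set.empty (fun s => s.add hrt.1)) d).keys := by
    intro l
    induction l with
    | nil => intro d hd; exact hd
    | cons x xs ih =>
      intro d hd a b
      refine ih _ (fun a b hab => ?_) a b
      rw [pv_adj_step_mem] at hab
      simp only [PySem.Dict.modify, PySem.Dict.mem_keys_insert]
      rcases hab with hmem | ⟨rfl, rfl⟩ | ⟨rfl, rfl⟩
      · exact Or.inr (Or.inr (hd _ _ hmem))
      · exact Or.inl rfl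
      · exact Or.inr (Or.inl rfl)
  exact this triples PySem.Dict.empty
    (fun a b hab => by simp [PySem.Dict.getD_empty, PySem.Set.empty] at hab) a b h

-- membership in the pure union fold
theorem pv_mem_unionFold (f : Int → PySem.Set Int) (xs : List Int) (s0 : PySem.Set Int)
    (w : Int) :
    w ∈ xs.foldl (fun s nb => PySem.Set.update s (f nb)) s0
      ↔ w ∈ s0 ∨ ∃ nb ∈ xs, w ∈ f nb := by
  induction xs generalizing s0 with
  | nil => simp
  | cons x xs ih =>
    simp only [List.foldl_cons]
    rw [ih]
    simp [PySem.Set.mem_update]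
    tauto

-- the pure union fold from the empty set is duplicate-free
theorem pv_nodup_unionFold (f : Int → PySem.Set Int) (xs : List Int) (s0 : PySem.Set Int)
    (h : s0.Nodup) :
    (xs.foldl (fun s nb => PySem.Set.update s (f nb)) s0).Nodup := by
  induction xs generalizing s0 with
  | nil => exact h
  | cons x xs ih => exact ih _ (PySem.Set.nodup_update _ _ h)

-- the core count identity: |two-hop set of node| = number of other nodes sharing a neighbor
theorem pv_count_eq (triples : List (Int × Int × Int)) (node : Int) :
    (PySem.Set.len (PySem.Set.discard
        (((pvBuildOneHop triples).getD node PySem.Set.empty).foldl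
          (fun s nb => PySem.Set.update s ((pvBuildOneHop triples).getD nb PySem.Set.empty))
          PySem.Set.empty) node) : Int)
      = (pvBuildOneHop triples).keys.foldl (fun c w =>
          if w ≠ node ∧ ((pvBuildOneHop triples).getD node PySem.Set.empty).any
              (fun m => PySem.Set.contains ((pvBuildOneHop triples).getD w PySem.Set.empty) m)
          then c + 1 else c) 0 := by
  set oh := pvBuildOneHop triples with hoh
  rw [PySem.List.foldl_ite_add_one]
  rw [zero_add]
  rw [List.countP_eq_length_filter]
  have hperm : (PySem.Set.discard
      ((oh.getD node PySem.Set.empty).foldl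
        (fun s nb => PySem.Set.update s (oh.getD nb PySem.Set.empty)) PySem.Set.empty) node).Perm
      (oh.keys.filter (fun w => decide (w ≠ node ∧ (oh.getD node PySem.Set.empty).any
        (fun m => PySem.Set.contains (oh.getD w PySem.Set.empty) m)))) := by
    apply (List.perm_ext_iff_of_nodup _ _).2
    · intro x
      rw [PySem.Set.mem_discard, pv_mem_unionFold, List.mem_filter]
      simp only [decide_eq_true_eq, List.any_eq_true, PySem.Set.contains_iff]
      constructor
      · rintro ⟨h1, hx⟩
        rcases h1 with h0 | ⟨nb, hnb, hxnb⟩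
        · simp [PySem.Set.empty] at h0
        · refine ⟨pv_adj_mem_keys triples x nb hxnb, hx, nb, hnb, ?_⟩
          exact (pv_adj_symm triples x nb).1 hxnb
      · rintro ⟨hk, hx, m, hm, hmx⟩
        refine ⟨Or.inr ⟨m, hm, ?_⟩, hx⟩
        exact (pv_adj_symm triples m x).1 hmx
    · exact PySem.Set.nodup_discard _ _
        (pv_nodup_unionFold _ _ _ List.nodup_nil)
    · exact List.Nodup.filter _ (pv_oneHop_keys_nodup triples)
  have := hperm.length_eq
  simp only [PySem.Set.len]
  omega

-- ===== VERDICT (by name: the statement is the Claim_ definition above) =====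
theorem get_neighbor_distribution_spec : Claim_equal_get_neighbor_distribution := by
  intro triples _
  show get_neighbor_distribution triples = get_neighbor_distribution_alt triples
  unfold get_neighbor_distribution get_neighbor_distribution_alt
  rw [show pvBuildAdj triples = pvBuildOneHop triples from rfl]
  set oh := pvBuildOneHop triples with hoh
  dsimp only
  congr 1
  apply PySem.List.foldl_congr_mem
  intro d node hnode
  rw [show (fun (d2 : PySem.Dict Int (PySem.Set Int)) (node : Int) =>
      (oh.getD node PySem.Set.empty).foldl (fun d2 neighbor =>
        (d2.modify node PySem.Set.empty
          (fun s => s.update (oh.getD neighbor PySem.Set.empty))).modify node PySem.Set.empty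
          (fun s => s.discard node)) d2) = pvStepA oh from rfl]
  rw [pv_twoHop_getD oh oh.keys PySem.Dict.empty node (pv_oneHop_keys_nodup triples) hnode]
  rw [show (PySem.Dict.empty : PySem.Dict Int (PySem.Set Int)).getD node PySem.Set.empty
      = PySem.Set.discard PySem.Set.empty node from rfl]
  rw [pv_inner_eq (fun nb => oh.getD nb PySem.Set.empty)
      (oh.getD node PySem.Set.empty) node PySem.Set.empty]
  rw [pv_count_eq triples node]
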